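-- pv_equiv track=rewrite | github.com/temetski/traffic_simulation | idle_intervals.py | count
-- ===== SOURCE A (Python) =====
-- def count(vehicle, intervals):
--     count = 0
--     for speed in vehicle:
--         if speed == 0:
--             count += 1
--         else:
--             intervals.append(count)
--             count = 0
--     return intervals
-- ===== SOURCE B (Python) =====
-- def count(vehicle, intervals):
--     nonzero_positions = [i for i, s in enumerate(vehicle) if s != 0]
--     prev = -1
--     for i in nonzero_positions:
--         intervals.append(i - prev - 1)
--         prev = i
--     return intervals
-- ===== Notes on version B (the rewrite author's own statement) =====
-- stated objective: alternative
-- what changed: Replaces the running zero-counter with a two-phase computation: first collect the indices of non-zero speeds, then append the gap (i - prev - 1) between consecutive non-zero indices.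
import Mathlib
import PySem

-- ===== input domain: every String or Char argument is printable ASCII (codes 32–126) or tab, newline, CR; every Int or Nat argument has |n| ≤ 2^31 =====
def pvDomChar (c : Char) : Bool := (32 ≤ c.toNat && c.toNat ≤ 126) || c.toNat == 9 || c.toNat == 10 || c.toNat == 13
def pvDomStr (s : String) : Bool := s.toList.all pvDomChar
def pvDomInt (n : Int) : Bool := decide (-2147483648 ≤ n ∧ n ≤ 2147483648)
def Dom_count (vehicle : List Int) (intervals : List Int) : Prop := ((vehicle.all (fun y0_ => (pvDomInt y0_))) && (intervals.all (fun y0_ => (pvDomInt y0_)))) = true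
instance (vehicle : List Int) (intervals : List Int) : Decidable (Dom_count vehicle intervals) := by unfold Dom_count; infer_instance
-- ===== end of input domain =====

-- B replaces A's running zero-counter with index-gap arithmetic over the non-zero positions
-- (same return value; both Pythons mutate `intervals` by the same appends).
-- ===== PORT A =====
def count (vehicle : List Int) (intervals : List Int) : List Int :=
  (vehicle.foldl
    (fun (st : List Int × Int) speed =>
      if speed == 0 then (st.1, st.2 + 1) else (st.1 ++ [st.2], 0))
    (intervals, 0)).1

-- ===== PORT B =====
def count_alt (vehicle : List Int) (intervals : List Int) : List Int :=
  let nonzeroPositions :=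
    ((PySem.List.enumerate vehicle).filter (fun p => p.2 != 0)).map Prod.fst
  (nonzeroPositions.foldl
    (fun (st : List Int × Int) i => (st.1 ++ [i - st.2 - 1], i))
    (intervals, -1)).1

-- ===== PRECONDITION & SPEC =====
def Spec_count (vehicle : List Int) (intervals : List Int) (out : List Int) : Prop := out = count_alt vehicle intervals
instance (vehicle : List Int) (intervals : List Int) (out : List Int) : Decidable (Spec_count vehicle intervals out) := by unfold Spec_count; infer_instance

-- ===== CLAIM (what is proved, stated in full; the proofs are below) =====
def Claim_equal_count : Prop := ∀ (vehicle : List Int) (intervals : List Int), Dom_count vehicle intervals → Spec_count vehicle intervals (count vehicle intervals)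

-- ===== LEMMAS AND PROOFS =====

theorem loop_eq (v : List Int) (acc : List Int) (k prev : Int) :
    (v.foldl
      (fun (st : List Int × Int) speed =>
        if speed == 0 then (st.1, st.2 + 1) else (st.1 ++ [st.2], 0))
      (acc, k - prev - 1)).1
    =
    ((((PySem.List.enumerate v k).filter (fun p => p.2 != 0)).map Prod.fst).foldl
      (fun (st : List Int × Int) i => (st.1 ++ [i - st.2 - 1], i))
      (acc, prev)).1 := by
  induction v generalizing acc k prev with
  | nil => simp [PySem.List.enumerate]
  | cons s ss ih =>
    rw [PySem.List.enumerate_cons]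
    by_cases hs : s = 0
    · subst hs
      have h1 : k - prev - 1 + 1 = (k + 1) - prev - 1 := by ring
      simpa [List.foldl, h1] using ih acc (k + 1) prev
    · have h := ih (acc ++ [k - prev - 1]) (k + 1) k
      have e : k + 1 - k - 1 = (0 : Int) := by ring
      rw [e] at h
      have hs' : (s != 0) = true := by simpa [bne_iff_ne] using hs
      simpa [List.foldl, List.filter, hs, hs'] using h

-- ===== VERDICT (by name: the statement is the Claim_ definition above) =====
theorem count_spec : Claim_equal_count := by
  intro vehicle intervals _
  unfold Spec_count count count_alt
  have := loop_eq vehicle intervals 0 (-1)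
  simpa using this
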